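-- pv_equiv track=rewrite | github.com/Azcobu/Advent-of-Code-2021 | 2018/day08/aoc18-8a.py | parse
-- ===== SOURCE A (Python) =====
-- def parse(data, total):
--     numkids = data.pop(0)
--     nummeta = data.pop(0)
--
--     for c in range(numkids):
--         total += parse(data, 0)
--
--     for m in range(nummeta):
--         total += data.pop(0)
--
--     return total
-- ===== SOURCE B (Python) =====
-- def parse(data, total):
--     # Iterative explicit-stack parser: same depth-first, left-to-right pops as the
--     # recursive original (data is mutated identically); total accumulates all metadata.
--     numkids = data.pop(0)
--     nummeta = data.pop(0)
--     stack = [[numkids, nummeta]]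
--     while stack:
--         top = stack[-1]
--         if top[0] > 0:
--             top[0] -= 1
--             nk = data.pop(0)
--             nm = data.pop(0)
--             stack.append([nk, nm])
--         else:
--             for _ in range(top[1]):
--                 total += data.pop(0)
--             stack.pop()
--     return total
-- ===== Notes on version B (the rewrite author's own statement) =====
-- stated objective: alternative
-- what changed: The recursive descent is replaced by an iterative parser driven by an explicit stack of (children_left, nummeta) frames, consuming the same depth-first prefix of data.
import Mathlib
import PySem

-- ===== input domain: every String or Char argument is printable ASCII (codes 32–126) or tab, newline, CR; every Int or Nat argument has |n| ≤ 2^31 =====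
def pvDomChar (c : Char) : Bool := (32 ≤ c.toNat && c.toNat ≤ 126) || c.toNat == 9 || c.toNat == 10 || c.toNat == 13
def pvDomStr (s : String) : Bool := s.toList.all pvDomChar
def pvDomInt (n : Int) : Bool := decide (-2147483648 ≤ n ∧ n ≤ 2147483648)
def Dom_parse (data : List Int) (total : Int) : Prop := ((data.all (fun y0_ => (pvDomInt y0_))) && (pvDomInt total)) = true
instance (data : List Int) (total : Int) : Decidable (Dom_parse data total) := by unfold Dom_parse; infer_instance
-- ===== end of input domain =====

-- B replaces A's recursion with an explicit-stack iterative parser (alternative decomposition,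
-- same cost); Python A mutates `data` by popping its tree prefix and B performs the identical
-- pops, the theorems below are about the RETURN value.

-- ===== PORT A =====
-- A is recursive and consumes the front of `data`; the port threads the remaining list
-- explicitly and uses a fuel bound (data.length + 1, always sufficient on Pre_-admitted input).
-- `for m in range(nummeta): total += data.pop(0)`
def metaA : Nat → List Int → Int → Int × List Int
  | 0, d, t => (t, d)
  | _+1, [], t => (t, [])          -- Python raises IndexError here; excluded by Pre_
  | n+1, x :: r, t => metaA n r (t + x)

-- `for c in range(numkids): total += parse(data, 0)`
def kidsF (f : List Int → Int → Int × List Int) : Nat → List Int → Int → Int × List Int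
  | 0, d, t => (t, d)
  | n+1, d, t =>
    let r := f d 0
    kidsF f n r.2 (t + r.1)

def parseA : Nat → List Int → Int → Int × List Int
  | 0, d, t => (t, d)              -- fuel exhausted; unreachable on Pre_-admitted input
  | fuel+1, d, t =>
    match d with
    | nk :: nm :: rest =>          -- numkids = data.pop(0); nummeta = data.pop(0)
      let r := kidsF (fun a b => parseA fuel a b) nk.toNat rest t
      metaA nm.toNat r.2 r.1
    | _ => (t, d)                  -- Python raises IndexError popping a header; excluded by Pre_

def parse (data : List Int) (total : Int) : Int :=
  (parseA (data.length + 1) data total).1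

-- ===== PORT B =====
-- `for _ in range(top[1]): total += data.pop(0)`
def metaB : Nat → List Int → Int → Int × List Int
  | 0, d, t => (t, d)
  | _+1, [], t => (t, [])          -- Python raises IndexError here; excluded by Pre_
  | n+1, x :: r, t => metaB n r (t + x)

-- termination measure fact for loopB (cited in its decreasing_by)
theorem metaB_len_le : ∀ (n : Nat) (d : List Int) (t : Int), (metaB n d t).2.length ≤ d.length := by
  intro n
  induction n with
  | zero => intro d t; simp [metaB]
  | succ n ih =>
    intro d t
    cases d with
    | nil => simp [metaB]
    | cons x r => exact le_trans (ih r (t + x)) (by simp)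

-- the `while stack:` loop of Source B; a frame is (children_left, nummeta)
def loopB : List Int → List (Int × Int) → Int → Int
  | _, [], t => t
  | d, (k, m) :: stack, t =>
    if k > 0 then
      match d with
      | nk :: nm :: rest => loopB rest ((nk, nm) :: (k - 1, m) :: stack) t
      | _ => t                     -- Python raises IndexError popping a header; excluded by Pre_
    else
      let r := metaB m.toNat d t
      loopB r.2 stack r.1
termination_by d stack _ => 2 * d.length + stack.length
decreasing_by
  · simp; omega
  · have h := metaB_len_le m.toNat d t
    simp only [List.length_cons]
    omega

def parse_alt (data : List Int) (total : Int) : Int :=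
  match data with
  | nk :: nm :: rest => loopB rest [(nk, nm)] total   -- stack = [[numkids, nummeta]]
  | _ => total                     -- Python raises IndexError; excluded by Pre_

-- ===== PRECONDITION & SPEC =====
-- Grammar recognizer for Pre_ (it computes no totals, it only matches the header grammar):
-- `chkRep f n d` matches n consecutive trees (each recognized by f), `chk1 fuel d`
-- matches one complete tree of depth < fuel and returns the remainder.
def chkRep (f : List Int → Option (List Int)) : Nat → List Int → Option (List Int)
  | 0, d => some d
  | n+1, d =>
    match f d with
    | some d2 => chkRep f n d2
    | none => none

def chk1 : Nat → List Int → Option (List Int)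
  | 0, _ => none
  | fuel+1, nk :: nm :: rest =>
    match chkRep (fun x => chk1 fuel x) nk.toNat rest with
    | some dk => if nm.toNat ≤ dk.length then some (dk.drop nm.toNat) else none
    | none => none
  | _+1, _ => none

-- Pre_: `data` starts with one complete header tree — exactly the inputs where Python A
-- returns instead of raising IndexError (the depth budget data.length + 1 is never the
-- binding constraint, since each tree level consumes two header cells).
def Pre_parse (data : List Int) (total : Int) : Prop :=
  (chk1 (data.length + 1) data).isSome = true
instance (data : List Int) (total : Int) : Decidable (Pre_parse data total) := by
  unfold Pre_parse; infer_instance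

def pvWitness_parse : List Int × Int := ([1, 1, 0, 1, 5, 9], 0)

def Spec_parse (data : List Int) (total : Int) (out : Int) : Prop := out = parse_alt data total
instance (data : List Int) (total : Int) (out : Int) : Decidable (Spec_parse data total out) := by
  unfold Spec_parse; infer_instance

-- ===== CLAIM (what is proved, stated in full; the proofs are below) =====
def Claim_equal_parse : Prop := ∀ (data : List Int) (total : Int), Dom_parse data total → Pre_parse data total → Spec_parse data total (parse data total)

-- ===== LEMMAS AND PROOFS =====

theorem metaB_eq_metaA : ∀ (n : Nat) (d : List Int) (t : Int), metaB n d t = metaA n d t := by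
  intro n
  induction n with
  | zero => intro d t; rfl
  | succ n ih => intro d t; cases d <;> simp [metaB, metaA, ih]

-- metaA is linear in its accumulator
theorem metaA_lin : ∀ (n : Nat) (d : List Int) (t : Int),
    (metaA n d t).1 = t + (metaA n d 0).1 ∧ (metaA n d t).2 = (metaA n d 0).2 := by
  intro n
  induction n with
  | zero => intro d t; simp [metaA]
  | succ n ih =>
    intro d t
    cases d with
    | nil => simp [metaA]
    | cons x r =>
      simp only [metaA]
      obtain ⟨h1, h2⟩ := ih r (t + x)
      obtain ⟨h1', _⟩ := ih r (0 + x)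
      exact ⟨by omega, by rw [h2, (ih r (0 + x)).2]⟩

theorem metaA_drop : ∀ (n : Nat) (d : List Int) (t : Int), n ≤ d.length → (metaA n d t).2 = d.drop n := by
  intro n
  induction n with
  | zero => intro d t _; rfl
  | succ n ih =>
    intro d t h
    cases d with
    | nil => simp at h
    | cons x r => simpa [metaA] using ih r (t + x) (by simpa using h)

-- kidsF is linear in its accumulator (it always restarts f at 0, as A does)
theorem kidsF_lin (f : List Int → Int → Int × List Int) : ∀ (n : Nat) (d : List Int) (t : Int),
    (kidsF f n d t).1 = t + (kidsF f n d 0).1 ∧ (kidsF f n d t).2 = (kidsF f n d 0).2 := by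
  intro n
  induction n with
  | zero => intro d t; simp [kidsF]
  | succ n ih =>
    intro d t
    simp only [kidsF]
    obtain ⟨h1, h2⟩ := ih (f d 0).2 (t + (f d 0).1)
    obtain ⟨h1', h2'⟩ := ih (f d 0).2 (0 + (f d 0).1)
    exact ⟨by omega, by rw [h2, h2']⟩

-- a successful match of the recognizer pins down the remainder parseA leaves behind
theorem alignRep (fuel : Nat)
    (h1 : ∀ (d d' : List Int) (t : Int), chk1 fuel d = some d' → (parseA fuel d t).2 = d') :
    ∀ (n : Nat) (d d' : List Int), chkRep (fun x => chk1 fuel x) n d = some d' →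
      ∀ t, (kidsF (fun a b => parseA fuel a b) n d t).2 = d' := by
  intro n
  induction n with
  | zero => intro d d' h t; simp [chkRep] at h; simp [kidsF, h]
  | succ n ihn =>
    intro d d' h t
    rcases hg : chk1 fuel d with _ | dmid
    · simp [chkRep, hg] at h
    · simp only [chkRep, hg] at h
      simp only [kidsF]
      rw [h1 d dmid 0 hg]
      exact ihn _ _ h _

theorem align1 : ∀ (fuel : Nat) (d d' : List Int), chk1 fuel d = some d' →
    ∀ t, (parseA fuel d t).2 = d' := by
  intro fuel
  induction fuel with
  | zero => intro d d' h t; simp [chk1] at h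
  | succ f ihf =>
    intro d d' h t
    cases d with
    | nil => simp [chk1] at h
    | cons nk tl =>
      cases tl with
      | nil => simp [chk1] at h
      | cons nm rest =>
        rcases hc : chkRep (fun x => chk1 f x) nk.toNat rest with _ | dk
        · simp only [chk1, hc] at h
          simp at h
        · simp only [chk1, hc] at h
          by_cases hm : nm.toNat ≤ dk.length
          · rw [if_pos hm] at h
            injection h with h
            simp only [parseA]
            rw [alignRep f (fun a b c hh => ihf a b hh c) nk.toNat rest dk hc t,
              metaA_drop _ _ _ hm]
            exact h
          · rw [if_neg hm] at h
            simp at h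

-- one whole frame of B's loop equals one recursive call of A
def stepAB (fuel n : Nat) (d : List Int) (t m : Int) : Int × List Int :=
  metaA m.toNat (kidsF (fun a b => parseA fuel a b) n d t).2 (kidsF (fun a b => parseA fuel a b) n d t).1

theorem frame_base : ∀ (fuel : Nat) (k m : Int) (d : List Int) (stack : List (Int × Int)) (t : Int),
    k.toNat = 0 →
    loopB d ((k, m) :: stack) t = loopB (stepAB fuel 0 d t m).2 stack (stepAB fuel 0 d t m).1 := by
  intro fuel k m d stack t hk
  have hk' : ¬ k > 0 := by omega
  rw [loopB.eq_def]
  simp [hk', stepAB, kidsF, metaB_eq_metaA]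

-- the step of B's loop for one child: push the child frame, decrement children_left
theorem loopB_push (k m nk nm : Int) (rest : List Int) (stack : List (Int × Int)) (t : Int)
    (hk : k > 0) :
    loopB (nk :: nm :: rest) ((k, m) :: stack) t = loopB rest ((nk, nm) :: (k - 1, m) :: stack) t := by
  rw [loopB.eq_def]
  simp [hk]

-- stepAB is linear in its accumulator
theorem stepAB_lin (f nf : Nat) (d : List Int) (t m : Int) :
    (stepAB f nf d t m).1 = t + (stepAB f nf d 0 m).1 ∧ (stepAB f nf d t m).2 = (stepAB f nf d 0 m).2 := by
  unfold stepAB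
  obtain ⟨k1, k2⟩ := kidsF_lin (fun a b => parseA f a b) nf d t
  rw [k1, k2]
  obtain ⟨m1, m2⟩ := metaA_lin m.toNat (kidsF (fun a b => parseA f a b) nf d 0).2
    (t + (kidsF (fun a b => parseA f a b) nf d 0).1)
  rw [m1, m2]
  obtain ⟨m1', m2'⟩ := metaA_lin m.toNat (kidsF (fun a b => parseA f a b) nf d 0).2
    (kidsF (fun a b => parseA f a b) nf d 0).1
  rw [m1', m2']
  exact ⟨by ring, rfl⟩

-- combining one child parse into the parent's kidsF run
theorem stepAB_succ (f n : Nat) (nk nm : Int) (rest : List Int) (t m : Int) :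
    stepAB (f + 1) n (stepAB f nk.toNat rest t nm).2 (stepAB f nk.toNat rest t nm).1 m
      = stepAB (f + 1) (n + 1) (nk :: nm :: rest) t m := by
  rw [(stepAB_lin f nk.toNat rest t nm).1, (stepAB_lin f nk.toNat rest t nm).2]
  rfl

theorem frame : ∀ (fuel : Nat) (n : Nat) (k m : Int) (d d1 : List Int) (stack : List (Int × Int)) (t : Int),
    k.toNat = n → chkRep (fun x => chk1 fuel x) n d = some d1 →
    loopB d ((k, m) :: stack) t = loopB (stepAB fuel n d t m).2 stack (stepAB fuel n d t m).1 := by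
  intro fuel
  induction fuel with
  | zero =>
    intro n k m d d1 stack t hk h
    cases n with
    | zero => exact frame_base 0 k m d stack t hk
    | succ n => simp [chkRep, chk1] at h
  | succ f ihf =>
    intro n
    induction n with
    | zero => intro k m d d1 stack t hk h; exact frame_base (f + 1) k m d stack t hk
    | succ n ihn =>
      intro k m d d1 stack t hk h
      have hk0 : k > 0 := by omega
      rcases hg : chk1 (f + 1) d with _ | dmid
      · simp [chkRep, hg] at h
      · simp only [chkRep, hg] at h
        cases d with
        | nil => simp [chk1] at hg
        | cons nk tl =>
          cases tl with
          | nil => simp [chk1] at hg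
          | cons nm rest =>
            rcases hc : chkRep (fun x => chk1 f x) nk.toNat rest with _ | dk
            · simp only [chk1, hc] at hg
              simp at hg
            · simp only [chk1, hc] at hg
              by_cases hm : nm.toNat ≤ dk.length
              · rw [if_pos hm] at hg
                injection hg with hg
                rw [loopB_push k m nk nm rest stack t hk0]
                rw [ihf nk.toNat nk nm rest dk ((k - 1, m) :: stack) t rfl hc]
                have hP2 : (stepAB f nk.toNat rest t nm).2 = dk.drop nm.toNat := by
                  unfold stepAB
                  rw [alignRep f (fun a b c hh => align1 f a b hh c) nk.toNat rest dk hc t,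
                    metaA_drop _ _ _ hm]
                rw [ihn (k - 1) m (stepAB f nk.toNat rest t nm).2 d1 stack
                  (stepAB f nk.toNat rest t nm).1 (by omega) (by rw [hP2, hg]; exact h)]
                rw [stepAB_succ f n nk nm rest t m]
              · rw [if_neg hm] at hg
                simp at hg

theorem loopB_nil (d : List Int) (t : Int) : loopB d [] t = t := by
  rw [loopB.eq_def]

-- ===== VERDICT (by name: the statement is the Claim_ definition above) =====
theorem parse_spec : Claim_equal_parse := by
  intro data total _ hpre
  unfold Spec_parse
  unfold Pre_parse at hpre
  rcases hch : chk1 (data.length + 1) data with _ | d1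
  · rw [hch] at hpre; simp at hpre
  · clear hpre
    cases data with
    | nil => simp [chk1] at hch
    | cons a tl =>
      cases tl with
      | nil => simp [chk1] at hch
      | cons b rest =>
        rcases hc : chkRep (fun x => chk1 ((a :: b :: rest).length) x) a.toNat rest with _ | dk
        · simp only [chk1, hc] at hch
          simp at hch
        · have hframe := frame ((a :: b :: rest).length) a.toNat a b rest dk [] total rfl hc
          show (parseA ((a :: b :: rest).length + 1) (a :: b :: rest) total).1
              = loopB rest [(a, b)] total
          rw [hframe, loopB_nil]
          rfl
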